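-- pv_equiv track=rewrite | github.com/amielajunio/CM2-extension | scripts/indexUtils.py | compare_indexes
-- ===== SOURCE A (Python) =====
-- def compare_indexes(required, existing):
--     """
--     required: output di compute_required_indexes
--     existing: output di normalize_existing_indexes
--
--     Ritorna per ogni collection:
--       - missing_in_existing: indici richiesti dai QP ma non presenti in Indexes
--       - extra_in_existing: indici presenti in Indexes ma non derivabili dai QP
--       - common: indici comuni
--     """
--     summary = {}
--     for coll in required.keys() | existing.keys():
--         req = required.get(coll, set())
--         ex = existing.get(coll, set())
--
--         summary[coll] = {
--             'missing_in_existing': sorted(req - ex),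
--             'extra_in_existing': sorted(ex - req),
--             'common': sorted(req & ex),
--         }
--     return summary
-- ===== SOURCE B (Python) =====
-- def compare_indexes(required, existing):
--     """Sort each collection's two index sets once, then a single two-pointer
--     merge over the two sorted sequences emits the three buckets already in
--     sorted order -- no set algebra and no per-bucket sorting."""
--     summary = {}
--     for coll in required.keys() | existing.keys():
--         req = sorted(required.get(coll, set()))
--         ex = sorted(existing.get(coll, set()))
--         missing, extra, common = [], [], []
--         i = j = 0
--         while i < len(req) and j < len(ex):
--             if req[i] == ex[j]:
--                 common.append(req[i])
--                 i += 1
--                 j += 1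
--             elif req[i] < ex[j]:
--                 missing.append(req[i])
--                 i += 1
--             else:
--                 extra.append(ex[j])
--                 j += 1
--         missing.extend(req[i:])
--         extra.extend(ex[j:])
--         summary[coll] = {
--             'missing_in_existing': missing,
--             'extra_in_existing': extra,
--             'common': common,
--         }
--     return summary
-- ===== Notes on version B (the rewrite author's own statement) =====
-- stated objective: alternative
-- what changed: Replaces the per-collection set algebra (req-ex, ex-req, req&ex, each followed by sorted()) with a sort-then-merge: sort the two index sets once and do a single two-pointer merge that emits missing/extra/common already in sorted order, so no set operations and no per-bucket sorting remain.
import Mathlib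
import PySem

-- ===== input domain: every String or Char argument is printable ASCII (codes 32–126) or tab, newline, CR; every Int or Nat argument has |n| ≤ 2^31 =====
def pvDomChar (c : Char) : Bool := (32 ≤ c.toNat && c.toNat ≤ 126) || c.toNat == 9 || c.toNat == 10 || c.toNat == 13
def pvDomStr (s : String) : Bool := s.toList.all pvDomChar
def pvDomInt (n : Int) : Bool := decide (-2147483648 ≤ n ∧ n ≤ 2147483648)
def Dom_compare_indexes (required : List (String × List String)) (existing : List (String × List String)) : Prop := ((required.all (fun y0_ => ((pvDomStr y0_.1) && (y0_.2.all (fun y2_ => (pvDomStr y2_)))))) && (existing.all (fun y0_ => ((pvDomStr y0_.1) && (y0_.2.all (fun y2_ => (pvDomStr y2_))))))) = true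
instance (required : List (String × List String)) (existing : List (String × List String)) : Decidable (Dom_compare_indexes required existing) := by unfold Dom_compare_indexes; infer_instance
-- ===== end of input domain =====

-- B replaces A's per-collection set algebra + per-bucket sorts by sorting the two
-- index sets once and emitting the three buckets with one two-pointer merge
-- (objective: alternative algorithm, same asymptotic cost).

-- shared helpers: d.keys() and d.get(k, set()) on a dict[str, set[str]] (first-match lookup)
def pyKeys (d : List (String × List String)) : List String := d.map (·.1)
def pyGetSet (d : List (String × List String)) (k : String) : PySem.Set String :=
  PySem.Set.ofList (((d.find? (fun p => p.1 == k)).map (·.2)).getD [])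

-- ===== PORT A =====
def compare_indexes (required : List (String × List String)) (existing : List (String × List String)) : List (String × List (String × List String)) :=
  let keys : PySem.Set String := PySem.Set.union (PySem.Set.ofList (pyKeys required)) (pyKeys existing)
  let summary : PySem.Dict String (List (String × List String)) :=
    keys.foldl (fun s coll =>
      let req := pyGetSet required coll
      let ex := pyGetSet existing coll
      s.insert coll
        [("missing_in_existing", PySem.List.sorted (PySem.Set.diff req ex) (fun x => x)),
         ("extra_in_existing", PySem.List.sorted (PySem.Set.diff ex req) (fun x => x)),
         ("common", PySem.List.sorted (PySem.Set.inter req ex) (fun x => x))])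
      PySem.Dict.empty
  summary.items

-- ===== PORT B =====
-- the two-pointer while loop of Source B: consume two sorted lists, classify at each step;
-- the trailing extends are the base cases
def mergeClassify : List String → List String → List String × List String × List String
  | [], ex => ([], ex, [])
  | r :: rs, [] => (r :: rs, [], [])
  | r :: rs, e :: es =>
    if r = e then
      let t := mergeClassify rs es
      (t.1, t.2.1, r :: t.2.2)
    else if r < e then
      let t := mergeClassify rs (e :: es)
      (r :: t.1, t.2.1, t.2.2)
    else
      let t := mergeClassify (r :: rs) es
      (t.1, e :: t.2.1, t.2.2)
  termination_by req ex => req.length + ex.length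

def compare_indexes_alt (required : List (String × List String)) (existing : List (String × List String)) : List (String × List (String × List String)) :=
  (PySem.Set.union (PySem.Set.ofList (pyKeys required)) (pyKeys existing)).map
    (fun coll =>
      let t := mergeClassify (PySem.List.sorted (pyGetSet required coll) (fun x => x))
                             (PySem.List.sorted (pyGetSet existing coll) (fun x => x))
      (coll,
        [("missing_in_existing", t.1),
         ("extra_in_existing", t.2.1),
         ("common", t.2.2)]))

-- ===== PRECONDITION & SPEC =====
def Spec_compare_indexes (required : List (String × List String)) (existing : List (String × List String)) (out : List (String × List (String × List String))) : Prop := out = compare_indexes_alt required existing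
instance (required : List (String × List String)) (existing : List (String × List String)) (out : List (String × List (String × List String))) : Decidable (Spec_compare_indexes required existing out) := by unfold Spec_compare_indexes; infer_instance

-- ===== CLAIM =====
def Claim_equal_compare_indexes : Prop := ∀ (required : List (String × List String)) (existing : List (String × List String)), Dom_compare_indexes required existing → Spec_compare_indexes required existing (compare_indexes required existing)

-- ===== LEMMAS AND PROOFS =====

-- the merge of two strictly increasing lists yields the three membership filters
theorem mergeClassify_eq (req ex : List String)
    (hr : req.Pairwise (· < ·)) (he : ex.Pairwise (· < ·)) :
    mergeClassify req ex =
      (req.filter (fun x => decide (x ∉ ex)),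
       ex.filter (fun x => decide (x ∉ req)),
       req.filter (fun x => decide (x ∈ ex))) := by
  induction req, ex using mergeClassify.induct with
  | case1 ex => simp [mergeClassify]
  | case2 r rs => simp [mergeClassify]
  | case3 rs e es ih =>
    have hr' := (List.pairwise_cons.mp hr).2
    have he' := (List.pairwise_cons.mp he).2
    have hrlt := (List.pairwise_cons.mp hr).1
    have helt := (List.pairwise_cons.mp he).1
    have h1 : List.filter (fun x => decide (x ∉ e :: es)) (e :: rs)
        = List.filter (fun x => decide (x ∉ es)) rs := by
      rw [List.filter_cons_of_neg (by simp)]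
      exact List.filter_congr (fun x hx =>
        decide_eq_decide.mpr (by simp [List.mem_cons, Ne.symm (ne_of_lt (hrlt x hx))]))
    have h2 : List.filter (fun x => decide (x ∉ e :: rs)) (e :: es)
        = List.filter (fun x => decide (x ∉ rs)) es := by
      rw [List.filter_cons_of_neg (by simp)]
      exact List.filter_congr (fun x hx =>
        decide_eq_decide.mpr (by simp [List.mem_cons, Ne.symm (ne_of_lt (helt x hx))]))
    have h3 : List.filter (fun x => decide (x ∈ e :: es)) (e :: rs)
        = e :: List.filter (fun x => decide (x ∈ es)) rs := by
      rw [List.filter_cons_of_pos (by simp)]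
      exact congrArg (e :: ·) (List.filter_congr (fun x hx =>
        decide_eq_decide.mpr (by simp [List.mem_cons, Ne.symm (ne_of_lt (hrlt x hx))])))
    have hstep : mergeClassify (e :: rs) (e :: es)
        = ((mergeClassify rs es).1, (mergeClassify rs es).2.1, e :: (mergeClassify rs es).2.2) := by
      simp [mergeClassify]
    rw [hstep, ih hr' he', h1, h2, h3]
  | case4 r rs e es hne hlt ih =>
    have hr' := (List.pairwise_cons.mp hr).2
    have hrlt := (List.pairwise_cons.mp hr).1
    have helt := (List.pairwise_cons.mp he).1
    have hne' : ∀ x ∈ e :: es, x ≠ r := by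
      intro x hx
      rcases List.mem_cons.mp hx with h | h
      · subst h; exact Ne.symm hne
      · exact Ne.symm (ne_of_lt (lt_trans hlt (helt x h)))
    have hnotmem : r ∉ e :: es := fun hmem => (hne' r hmem) rfl
    have h1 : List.filter (fun x => decide (x ∉ e :: es)) (r :: rs)
        = r :: List.filter (fun x => decide (x ∉ e :: es)) rs := by
      rw [List.filter_cons_of_pos (by simp [hnotmem])]
    have h2 : List.filter (fun x => decide (x ∉ r :: rs)) (e :: es)
        = List.filter (fun x => decide (x ∉ rs)) (e :: es) := by
      exact List.filter_congr (fun x hx =>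
        decide_eq_decide.mpr (by simp [List.mem_cons, hne' x hx]))
    have h3 : List.filter (fun x => decide (x ∈ e :: es)) (r :: rs)
        = List.filter (fun x => decide (x ∈ e :: es)) rs := by
      rw [List.filter_cons_of_neg (by simp [hnotmem])]
    have hstep : mergeClassify (r :: rs) (e :: es)
        = (r :: (mergeClassify rs (e :: es)).1, (mergeClassify rs (e :: es)).2.1,
           (mergeClassify rs (e :: es)).2.2) := by
      simp [mergeClassify, hne, hlt]
    rw [hstep, ih hr' he, h1, h2, h3]
  | case5 r rs e es hne hnlt ih =>
    have he' := (List.pairwise_cons.mp he).2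
    have hrlt := (List.pairwise_cons.mp hr).1
    have helt := (List.pairwise_cons.mp he).1
    have hgt : e < r := by
      rcases lt_trichotomy r e with h | h | h
      · exact absurd h hnlt
      · exact absurd h hne
      · exact h
    have hne' : ∀ x ∈ r :: rs, x ≠ e := by
      intro x hx
      rcases List.mem_cons.mp hx with h | h
      · subst h; exact hne
      · exact Ne.symm (ne_of_lt (lt_trans hgt (hrlt x h)))
    have hnotmem : e ∉ r :: rs := fun hmem => (hne' e hmem) rfl
    have h1 : List.filter (fun x => decide (x ∉ e :: es)) (r :: rs)
        = List.filter (fun x => decide (x ∉ es)) (r :: rs) := by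
      exact List.filter_congr (fun x hx =>
        decide_eq_decide.mpr (by simp [List.mem_cons, hne' x hx]))
    have h2 : List.filter (fun x => decide (x ∉ r :: rs)) (e :: es)
        = e :: List.filter (fun x => decide (x ∉ r :: rs)) es := by
      rw [List.filter_cons_of_pos (by simp [hnotmem])]
    have h3 : List.filter (fun x => decide (x ∈ e :: es)) (r :: rs)
        = List.filter (fun x => decide (x ∈ es)) (r :: rs) := by
      exact List.filter_congr (fun x hx =>
        decide_eq_decide.mpr (by simp [List.mem_cons, hne' x hx]))
    have hstep : mergeClassify (r :: rs) (e :: es)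
        = ((mergeClassify (r :: rs) es).1, e :: (mergeClassify (r :: rs) es).2.1,
           (mergeClassify (r :: rs) es).2.2) := by
      simp [mergeClassify, hne, hnlt]
    rw [hstep, ih hr he', h1, h2, h3]

-- sorted(T) equals the p-filter of sorted(R) when T holds exactly R's p-elements
theorem sorted_eq_filter_sorted (lr : List String) (T : PySem.Set String) (hT : T.Nodup)
    (p : String → Bool) (hmem : ∀ x, x ∈ T ↔ x ∈ PySem.Set.ofList lr ∧ p x = true) :
    PySem.List.sorted T (fun x => x) =
      (PySem.List.sorted (PySem.Set.ofList lr) (fun x => x)).filter p := by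
  apply PySem.List.sorted_eq_of_perm_of_pairwise_lt
  · apply (List.perm_ext_iff_of_nodup ?_ hT).2
    · intro a
      simp only [List.mem_filter, PySem.List.mem_sorted, hmem]
    · exact ((PySem.List.sorted_perm _ _ _).nodup_iff.mpr (PySem.Set.nodup_ofList lr)).filter p
  · exact List.Pairwise.filter p (PySem.List.sorted_ofList_pairwise_lt lr)

-- per collection, the merge of the two sorted sets reproduces A's three sorted buckets
theorem per_coll (lr le : List String) :
    mergeClassify (PySem.List.sorted (PySem.Set.ofList lr) (fun x => x))
                  (PySem.List.sorted (PySem.Set.ofList le) (fun x => x)) =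
      (PySem.List.sorted (PySem.Set.diff (PySem.Set.ofList lr) (PySem.Set.ofList le)) (fun x => x),
       PySem.List.sorted (PySem.Set.diff (PySem.Set.ofList le) (PySem.Set.ofList lr)) (fun x => x),
       PySem.List.sorted (PySem.Set.inter (PySem.Set.ofList lr) (PySem.Set.ofList le)) (fun x => x)) := by
  rw [mergeClassify_eq _ _ (PySem.List.sorted_ofList_pairwise_lt lr)
        (PySem.List.sorted_ofList_pairwise_lt le)]
  refine Prod.ext ?_ (Prod.ext ?_ ?_) <;> simp only
  · exact (sorted_eq_filter_sorted lr _ (PySem.Set.nodup_diff _ _ (PySem.Set.nodup_ofList lr)) _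
      (fun x => by simp [PySem.Set.mem_diff, PySem.List.mem_sorted])).symm
  · exact (sorted_eq_filter_sorted le _ (PySem.Set.nodup_diff _ _ (PySem.Set.nodup_ofList le)) _
      (fun x => by simp [PySem.Set.mem_diff, PySem.List.mem_sorted])).symm
  · exact (sorted_eq_filter_sorted lr _ (PySem.Set.nodup_inter _ _ (PySem.Set.nodup_ofList lr)) _
      (fun x => by simp [PySem.Set.mem_inter, PySem.List.mem_sorted])).symm

-- an insert-loop over duplicate-free fresh keys is the corresponding map
theorem items_insert_loop (keys : List String) (hk : keys.Nodup)
    (f : String → List (String × List String)) :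
    (keys.foldl (fun (s : PySem.Dict String (List (String × List String))) coll =>
        s.insert coll (f coll)) PySem.Dict.empty).items
      = keys.map (fun coll => (coll, f coll)) := by
  have := PySem.Dict.items_foldl_insert_fresh keys (fun coll => coll) f
    (PySem.Dict.empty (κ := String) (ν := List (String × List String)))
    (by intro a _; simp [PySem.Dict.contains, PySem.Dict.empty])
    (by simpa using hk)
  simpa [PySem.Dict.empty, PySem.Dict.items] using this

-- ===== VERDICT =====
theorem compare_indexes_spec : Claim_equal_compare_indexes := by
  intro required existing _
  show compare_indexes required existing = compare_indexes_alt required existing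
  unfold compare_indexes compare_indexes_alt
  rw [items_insert_loop _
    (PySem.Set.nodup_union _ _ (PySem.Set.nodup_ofList (pyKeys required)))]
  refine List.map_congr_left (fun coll _ => ?_)
  simp only [pyGetSet, per_coll]
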